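-- pv_equiv track=rewrite | github.com/Bmcbob76/prometheus-prime | password_cracking.py | brute_force_generate
-- ===== SOURCE A (Python) =====
-- from typing import Dict, List, Optional, Any
-- import itertools
-- import string
--
-- def brute_force_generate(charset: str = "lowercase",
--                         min_length: int = 1, max_length: int = 4) -> List[str]:
--     """
--     Generate brute force password combinations.
--
--     Args:
--         charset: Character set (lowercase, uppercase, digits, special, all)
--         min_length: Minimum password length
--         max_length: Maximum password length
--
--     Returns:
--         List of generated passwords
--     """
--     charsets = {
--         'lowercase': string.ascii_lowercase,
--         'uppercase': string.ascii_uppercase,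
--         'digits': string.digits,
--         'special': string.punctuation,
--         'all': string.ascii_letters + string.digits + string.punctuation
--     }
--
--     if charset not in charsets:
--         return []
--
--     chars = charsets[charset]
--     passwords = []
--
--     # Limit to prevent memory issues
--     total_combinations = sum(len(chars) ** i for i in range(min_length, max_length + 1))
--     if total_combinations > 100000:
--         return ["ERROR: Too many combinations. Reduce length or use wordlist attack."]
--
--     for length in range(min_length, max_length + 1):
--         for combo in itertools.product(chars, repeat=length):
--             passwords.append(''.join(combo))
--
--     return passwords[:10000]  # Limit to 10k
-- ===== SOURCE B (Python) =====
-- import string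
--
-- def brute_force_generate(charset: str = "lowercase",
--                          min_length: int = 1, max_length: int = 4):
--     # DP-style generation: each length's passwords are built by extending the
--     # previous length's list, instead of an independent itertools.product per length.
--     charsets = {
--         'lowercase': string.ascii_lowercase,
--         'uppercase': string.ascii_uppercase,
--         'digits': string.digits,
--         'special': string.punctuation,
--         'all': string.ascii_letters + string.digits + string.punctuation
--     }
--
--     if charset not in charsets:
--         return []
--
--     chars = charsets[charset]
--
--     total_combinations = sum(len(chars) ** i for i in range(min_length, max_length + 1))
--     if total_combinations > 100000:
--         return ["ERROR: Too many combinations. Reduce length or use wordlist attack."]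
--
--     passwords = []
--     cur = ['']
--     if min_length <= 0 <= max_length:
--         passwords.extend(cur)
--     if min_length <= max_length:
--         length = 1
--         while length <= max_length:
--             cur = [p + c for p in cur for c in chars]
--             if min_length <= length:
--                 passwords.extend(cur)
--             length += 1
--
--     return passwords[:10000]
-- ===== Notes on version B (the rewrite author's own statement) =====
-- stated objective: alternative
-- what changed: Replaces the per-length itertools.product calls by a DP-style table build (cur = [p+c for p in cur for c in chars]) that extends the previous length's password list to obtain the next length's, emitting cur whenever the length is in range.
-- crash fix: On valid-charset calls with negative min_length, a nonempty length range and a guard sum at most 100000, A raises ValueError (itertools.product with negative repeat) while B returns the passwords of the non-negative lengths in range. — e.g. on brute_force_generate("digits", -1, 1): A raises ValueError, B returns ["", "0", "1", "2", "3", "4", "5", "6", "7", "8", "9"]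
import Mathlib
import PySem

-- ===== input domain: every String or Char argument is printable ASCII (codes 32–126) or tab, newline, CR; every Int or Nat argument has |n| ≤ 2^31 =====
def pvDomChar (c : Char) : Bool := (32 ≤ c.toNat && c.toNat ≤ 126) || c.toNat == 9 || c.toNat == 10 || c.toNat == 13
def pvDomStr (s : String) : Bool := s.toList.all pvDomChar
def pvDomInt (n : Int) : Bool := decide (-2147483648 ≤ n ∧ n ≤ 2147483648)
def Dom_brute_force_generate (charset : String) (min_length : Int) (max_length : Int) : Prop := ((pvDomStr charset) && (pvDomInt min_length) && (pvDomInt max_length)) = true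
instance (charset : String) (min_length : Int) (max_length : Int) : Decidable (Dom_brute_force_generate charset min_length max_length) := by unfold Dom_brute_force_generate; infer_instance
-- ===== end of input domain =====

-- B replaces A's per-length itertools.product calls by a DP-style loop that extends the previous
-- length's password list to build the next length's (alternative decomposition, same cost);
-- where A raises ValueError (negative min_length with nonempty range, small guard), B returns a value (see Raises_).


-- ===== PORT A =====
def pvLower : String := "abcdefghijklmnopqrstuvwxyz"
def pvUpper : String := "ABCDEFGHIJKLMNOPQRSTUVWXYZ"
def pvDigits : String := "0123456789"
def pvPunct : String := "!\"#$%&'()*+,-./:;<=>?@[\\]^_`{|}~"  -- string.punctuation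
-- the charsets dict (identical literal in A and in B)
def pvCharsets : PySem.Dict String String :=
  PySem.Dict.mk [("lowercase", pvLower), ("uppercase", pvUpper), ("digits", pvDigits),
                 ("special", pvPunct), ("all", pvLower ++ pvUpper ++ pvDigits ++ pvPunct)]
-- total_combinations = sum(len(chars) ** i for i in range(min_length, max_length + 1));
-- exact for the lengths admitted by Pre_ (all exponents ≥ 0; Python computes float powers for a
-- negative i, and such calls are outside Pre_).  This line is identical in A and in B.
def pvTotalCombos (chars : String) (mn mx : Int) : Int :=
  (PySem.List.pyRange mn (mx + 1) 1).foldl (fun acc i => acc + (PySem.Str.len chars) ^ i.toNat) 0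

-- itertools.product(chars, repeat=n): leftmost position varies slowest
def pvProdA (cs : List Char) : Nat → List (List Char)
  | 0 => [[]]
  | n + 1 => cs.flatMap (fun c => (pvProdA cs n).map (fun t => c :: t))

def brute_force_generate (charset : String) (min_length : Int) (max_length : Int) : List String :=
  match PySem.Dict.get? pvCharsets charset with
  | none => []
  | some chars =>
    if pvTotalCombos chars min_length max_length > 100000 then
      ["ERROR: Too many combinations. Reduce length or use wordlist attack."]
    else
      -- for length in range(min, max+1): for combo in product(chars, repeat=length): passwords.append(''.join(combo))
      ((PySem.List.pyRange min_length (max_length + 1) 1).foldl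
        (fun passwords len => passwords ++ (pvProdA chars.toList len.toNat).map (fun t => String.ofList t)) []).take 10000
      -- ''.join over a tuple of chars is String.ofList; passwords[:10000] with a non-negative literal bound is take

-- ===== PORT B =====
-- cur = [p + c for p in cur for c in chars]
def pvAltStep (cs : List Char) (cur : List String) : List String :=
  cur.flatMap (fun p => cs.map (fun c => p.push c))
-- the 'while length <= max_length' loop of Source B; the fuel argument is exactly its iteration count
def pvAltLoop (cs : List Char) (mn : Int) : Nat → Int → List String → List String → List String
  | 0, _, _, passwords => passwords
  | k + 1, length, cur, passwords =>
    let cur' := pvAltStep cs cur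
    pvAltLoop cs mn k (length + 1) cur' (if mn ≤ length then passwords ++ cur' else passwords)

def brute_force_generate_alt (charset : String) (min_length : Int) (max_length : Int) : List String :=
  match PySem.Dict.get? pvCharsets charset with
  | none => []
  | some chars =>
    if pvTotalCombos chars min_length max_length > 100000 then
      ["ERROR: Too many combinations. Reduce length or use wordlist attack."]
    else
      -- passwords starts with '' iff 0 lies in [min_length, max_length]; the while loop runs only
      -- when the length range is nonempty
      (if min_length ≤ max_length then
        pvAltLoop chars.toList min_length max_length.toNat 1 [""]
          (if min_length ≤ 0 ∧ 0 ≤ max_length then [""] else [])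
       else (if min_length ≤ 0 ∧ 0 ≤ max_length then [""] else [])).take 10000

-- ===== PRECONDITION & SPEC =====
-- Pre_ excludes valid-charset calls with a negative min_length and a nonempty length range: on those A either
-- raises (ValueError from itertools.product with negative repeat, or OverflowError in the guard sum) or returns
-- the guard's ERROR string computed through float powers, which are not portable exactly.
def Pre_brute_force_generate (charset : String) (min_length : Int) (max_length : Int) : Prop :=
  (charset = "lowercase" ∨ charset = "uppercase" ∨ charset = "digits" ∨ charset = "special" ∨ charset = "all") →
  (min_length < 0 → max_length < min_length)
instance (charset : String) (min_length : Int) (max_length : Int) : Decidable (Pre_brute_force_generate charset min_length max_length) := by unfold Pre_brute_force_generate; infer_instance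

def pvWitness_brute_force_generate : String × Int × Int := ("digits", 1, 2)

-- On valid-charset calls with a negative min_length, a nonempty length range and a guard sum at most 100000,
-- A raises ValueError (itertools.product with negative repeat) while B returns the passwords of the
-- non-negative lengths in range.
def Raises_brute_force_generate (charset : String) (min_length : Int) (max_length : Int) : Prop :=
  (charset = "lowercase" ∨ charset = "uppercase" ∨ charset = "digits" ∨ charset = "special" ∨ charset = "all") ∧
  min_length < 0 ∧ min_length ≤ max_length ∧
  (PySem.List.pyRange 0 (max_length + 1) 1).foldl
    (fun acc i => acc + (if charset = "digits" then (10 : Int) else if charset = "special" then 32 else if charset = "all" then 94 else 26) ^ i.toNat) 0 ≤ 100000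
instance (charset : String) (min_length : Int) (max_length : Int) : Decidable (Raises_brute_force_generate charset min_length max_length) := by unfold Raises_brute_force_generate; infer_instance

def pvRaiseWitness_brute_force_generate : String × Int × Int := ("digits", -1, 1)
def pvRaiseWitnessOut_brute_force_generate : List String := ["", "0", "1", "2", "3", "4", "5", "6", "7", "8", "9"]

def Spec_brute_force_generate (charset : String) (min_length : Int) (max_length : Int) (out : List String) : Prop := out = brute_force_generate_alt charset min_length max_length
instance (charset : String) (min_length : Int) (max_length : Int) (out : List String) : Decidable (Spec_brute_force_generate charset min_length max_length out) := by unfold Spec_brute_force_generate; infer_instance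

-- ===== CLAIM (what is proved, stated in full; the proofs are below) =====
def Claim_equal_brute_force_generate : Prop := ∀ (charset : String) (min_length : Int) (max_length : Int), Dom_brute_force_generate charset min_length max_length → Pre_brute_force_generate charset min_length max_length → Spec_brute_force_generate charset min_length max_length (brute_force_generate charset min_length max_length)

def Claim_raises_brute_force_generate : Prop := (∀ (charset : String) (min_length : Int) (max_length : Int), Dom_brute_force_generate charset min_length max_length → Raises_brute_force_generate charset min_length max_length → ¬ Pre_brute_force_generate charset min_length max_length) ∧ (Dom_brute_force_generate (pvRaiseWitness_brute_force_generate.1) (pvRaiseWitness_brute_force_generate.2.1) (pvRaiseWitness_brute_force_generate.2.2) ∧ Raises_brute_force_generate (pvRaiseWitness_brute_force_generate.1) (pvRaiseWitness_brute_force_generate.2.1) (pvRaiseWitness_brute_force_generate.2.2) ∧ brute_force_generate_alt (pvRaiseWitness_brute_force_generate.1) (pvRaiseWitness_brute_force_generate.2.1) (pvRaiseWitness_brute_force_generate.2.2) = pvRaiseWitnessOut_brute_force_generate)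

-- ===== LEMMAS AND PROOFS =====

lemma pvPush (l : List Char) (c : Char) : (String.ofList l).push c = String.ofList (l ++ [c]) := by
  have h : ((String.ofList l).push c).toList = (String.ofList (l ++ [c])).toList := by simp
  exact String.toList_inj.mp h

lemma pvProdA_succ_snoc (cs : List Char) (n : Nat) :
    pvProdA cs (n + 1) = (pvProdA cs n).flatMap (fun t => cs.map (fun c => t ++ [c])) := by
  induction n with
  | zero =>
    show cs.flatMap (fun c => [[c]]) = _
    induction cs with | nil => rfl | cons c t ih => simp_all [pvProdA]
  | succ n ih =>
    show cs.flatMap (fun c => (pvProdA cs (n + 1)).map (fun t => c :: t)) = _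
    conv_rhs => rw [show pvProdA cs (n + 1) = cs.flatMap (fun c => (pvProdA cs n).map (fun t => c :: t)) from rfl]
    conv_lhs => rw [ih]
    simp [List.flatMap_map, List.map_flatMap, List.flatMap_assoc, Function.comp_def]

lemma pvAltStep_prod (cs : List Char) (n : Nat) :
    pvAltStep cs ((pvProdA cs n).map (fun t => String.ofList t)) = (pvProdA cs (n + 1)).map (fun t => String.ofList t) := by
  rw [pvProdA_succ_snoc]
  simp [pvAltStep, List.flatMap_map, List.map_flatMap, pvPush, Function.comp_def]

lemma pvAltLoop_emits (cs : List Char) (mn : Int) :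
    ∀ (k : Nat) (length : Int) (passwords : List String), 1 ≤ length →
      pvAltLoop cs mn k length ((pvProdA cs (length - 1).toNat).map (fun t => String.ofList t)) passwords
        = passwords ++
          ((PySem.List.pyRange length (length + k) 1).filter (fun i => decide (mn ≤ i))).flatMap
            (fun i => (pvProdA cs i.toNat).map (fun t => String.ofList t)) := by
  intro k
  induction k with
  | zero =>
    intro length passwords _
    rw [PySem.List.pyRange_one_eq_nil (by omega)]
    simp [pvAltLoop]
  | succ k ih =>
    intro length passwords h1
    have ht : (length - 1).toNat + 1 = length.toNat := by omega
    have hc : pvAltStep cs ((pvProdA cs (length - 1).toNat).map (fun t => String.ofList t))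
        = (pvProdA cs length.toNat).map (fun t => String.ofList t) := by
      rw [pvAltStep_prod, ht]
    simp only [pvAltLoop, hc]
    have hcur : (pvProdA cs length.toNat).map (fun t => String.ofList t)
        = (pvProdA cs ((length + 1) - 1).toNat).map (fun t => String.ofList t) := by norm_num
    rw [hcur, ih (length + 1) _ (show (1:Int) ≤ length + 1 by omega)]
    have harg : length + 1 + (k : Int) = length + ((k + 1 : Nat) : Int) := by push_cast; ring
    rw [harg]
    rw [show PySem.List.pyRange length (length + ((k + 1 : Nat) : Int)) 1
          = length :: PySem.List.pyRange (length + 1) (length + ((k + 1 : Nat) : Int)) 1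
        from PySem.List.pyRange_one_cons (by push_cast; omega)]
    simp only [List.filter_cons]
    by_cases hm : mn ≤ length
    · simp [hm, List.append_assoc]
    · simp [hm]

lemma pvLists_eq (cs : List Char) (mn mx : Int) (hpre : mn < 0 → mx < mn) :
    (PySem.List.pyRange mn (mx + 1) 1).foldl
      (fun passwords len => passwords ++ (pvProdA cs len.toNat).map (fun t => String.ofList t)) []
    = (if mn ≤ mx then
        pvAltLoop cs mn mx.toNat 1 [""] (if mn ≤ 0 ∧ 0 ≤ mx then [""] else [])
       else (if mn ≤ 0 ∧ 0 ≤ mx then [""] else [])) := by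
  have hstart : ([""] : List String) = (pvProdA cs ((1 : Int) - 1).toNat).map (fun t => String.ofList t) := by
    norm_num [pvProdA]
  rw [PySem.List.foldl_append_eq_flatMap]
  by_cases hle : mn ≤ mx
  · rw [if_pos hle]
    have hmn : 0 ≤ mn := by by_contra h; push Not at h; have := hpre h; omega
    have hmx : 0 ≤ mx := le_trans hmn hle
    rw [hstart, pvAltLoop_emits cs mn mx.toNat 1 _ le_rfl]
    rw [show (1 : Int) + (mx.toNat : Int) = mx + 1 from by omega]
    by_cases hz : mn = 0
    · rw [if_pos ⟨le_of_eq hz, hmx⟩]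
      have hfilter : (PySem.List.pyRange 1 (mx + 1) 1).filter (fun i => decide (mn ≤ i))
          = PySem.List.pyRange 1 (mx + 1) 1 := by
        apply List.filter_eq_self.mpr
        intro a ha
        have := (PySem.List.mem_pyRange_one).mp ha
        simp; omega
      rw [hfilter, hz, show PySem.List.pyRange 0 (mx + 1) 1 = 0 :: PySem.List.pyRange 1 (mx + 1) 1
            from by rw [PySem.List.pyRange_one_cons (by omega)]; norm_num]
      simp [pvProdA]
    · have hpos : 1 ≤ mn := by omega
      rw [if_neg (by omega)]
      rw [show PySem.List.pyRange 1 (mx + 1) 1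
            = PySem.List.pyRange 1 mn 1 ++ PySem.List.pyRange mn (mx + 1) 1
          from PySem.List.pyRange_one_append 1 mn (mx + 1) (by omega) (by omega)]
      rw [List.filter_append]
      have h1 : (PySem.List.pyRange 1 mn 1).filter (fun i => decide (mn ≤ i)) = [] := by
        apply List.filter_eq_nil_iff.mpr
        intro a ha
        have := (PySem.List.mem_pyRange_one).mp ha
        simp; omega
      have h2 : (PySem.List.pyRange mn (mx + 1) 1).filter (fun i => decide (mn ≤ i))
          = PySem.List.pyRange mn (mx + 1) 1 := by
        apply List.filter_eq_self.mpr
        intro a ha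
        have := (PySem.List.mem_pyRange_one).mp ha
        simp; omega
      rw [h1, h2]
      simp
  · push Not at hle
    rw [if_neg (by omega), if_neg (by omega)]
    rw [PySem.List.pyRange_one_eq_nil (by omega)]
    rfl

-- a successful dict lookup means the charset is one of the five keys
lemma pvCharsets_key (charset : String) (chars : String)
    (h : PySem.Dict.get? pvCharsets charset = some chars) :
    charset = "lowercase" ∨ charset = "uppercase" ∨ charset = "digits" ∨ charset = "special" ∨ charset = "all" := by
  by_contra hc
  push Not at hc
  obtain ⟨h1, h2, h3, h4, h5⟩ := hc
  rw [pvCharsets] at h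
  simp [PySem.Dict.get?, Ne.symm h1, Ne.symm h2, Ne.symm h3, Ne.symm h4, Ne.symm h5] at h

-- ===== VERDICT (by name: the statement is the Claim_ definition above) =====
theorem brute_force_generate_spec : Claim_equal_brute_force_generate := by
  intro charset mn mx _ hpre
  unfold Spec_brute_force_generate brute_force_generate brute_force_generate_alt
  cases h : PySem.Dict.get? pvCharsets charset with
  | none => rfl
  | some chars =>
    have hp : mn < 0 → mx < mn := hpre (pvCharsets_key charset chars h)
    dsimp only
    by_cases hg : pvTotalCombos chars mn mx > 100000
    · rw [if_pos hg, if_pos hg]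
    · rw [if_neg hg, if_neg hg]
      exact congrArg (List.take 10000) (pvLists_eq chars.toList mn mx hp)

theorem brute_force_generate_raises : Claim_raises_brute_force_generate := by
  unfold Claim_raises_brute_force_generate
  refine ⟨?_, by decide⟩
  intro charset mn mx _ hr hpre
  obtain ⟨hk, hneg, hle, _⟩ := hr
  exact absurd (hpre hk hneg) (by omega)

-- self-check: the raise witness really lies outside Pre_ (instance of brute_force_generate_raises.1)
theorem pvRaiseWitness_outside_Pre_ok : ¬ Pre_brute_force_generate "digits" (-1) 1 :=
  brute_force_generate_raises.1 "digits" (-1) 1 (by decide) (by decide)
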